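-- pv_equiv track=rewrite | github.com/rodaciri/problemrider | scripts/start_causal_reasoning.py | get_prioritized_batches
-- ===== SOURCE A (Python) =====
-- def get_prioritized_batches(similarities, completed_pairs, batch_size=10):
--     """Get batches of problem pairs prioritized by similarity, excluding completed ones"""
--     available_similarities = [
--         sim for sim in similarities
--         if sim['pair_key'] not in completed_pairs
--     ]
--
--     batches = []
--     for i in range(0, len(available_similarities), batch_size):
--         batch = available_similarities[i:i + batch_size]
--         batches.append(batch)
--
--     return batches
-- ===== SOURCE B (Python) =====
-- def get_prioritized_batches(similarities, completed_pairs, batch_size=10):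
--     """Get batches of problem pairs prioritized by similarity, excluding completed ones"""
--     done = set(completed_pairs)
--     batches = []
--     current = []
--     for sim in similarities:
--         if sim['pair_key'] in done:
--             continue
--         current.append(sim)
--         if len(current) == batch_size:
--             batches.append(current)
--             current = []
--     if current:
--         batches.append(current)
--     return batches
-- ===== Notes on version B (the rewrite author's own statement) =====
-- stated objective: alternative
-- what changed: Replaces the filter-comprehension plus index/range slicing with a single pass that skips completed pair_keys (via a set) and accumulates a current batch, flushing it when full; Pre_ excludes batch_size = 0 and sims without 'pair_key' (A raises) and negative batch_size with some uncompleted sim, where A's [] and B's single batch are both accidental.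
-- outside the precondition, e.g. on get_prioritized_batches([{'pair_key': 'a~b'}], set(), -1): A returns [], B returns [[{'pair_key': 'a~b'}]]
import Mathlib
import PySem

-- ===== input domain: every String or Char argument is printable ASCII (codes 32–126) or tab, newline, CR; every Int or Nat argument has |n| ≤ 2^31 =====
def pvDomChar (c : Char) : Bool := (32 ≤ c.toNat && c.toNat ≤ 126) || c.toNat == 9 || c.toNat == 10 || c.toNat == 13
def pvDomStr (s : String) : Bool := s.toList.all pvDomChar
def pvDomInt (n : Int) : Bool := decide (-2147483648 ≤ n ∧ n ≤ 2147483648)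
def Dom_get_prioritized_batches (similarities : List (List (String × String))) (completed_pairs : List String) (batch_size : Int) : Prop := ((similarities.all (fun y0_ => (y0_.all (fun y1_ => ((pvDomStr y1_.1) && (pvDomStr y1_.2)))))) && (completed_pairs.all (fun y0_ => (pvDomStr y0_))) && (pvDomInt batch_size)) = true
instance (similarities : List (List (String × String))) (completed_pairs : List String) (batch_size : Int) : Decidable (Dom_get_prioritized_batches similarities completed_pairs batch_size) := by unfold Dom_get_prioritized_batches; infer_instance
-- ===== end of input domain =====

-- B replaces A's filter-comprehension + range/slice chunking with one accumulator pass
-- (alternative decomposition, same result on positive batch sizes).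

-- ===== PORT A =====
-- sim['pair_key'] : first-match lookup in the association list; a missing key (KeyError) is excluded by Pre_
def pvKeyA (sim : List (String × String)) : String :=
  ((PySem.Dict.mk sim).get? "pair_key").getD ""

def get_prioritized_batches (similarities : List (List (String × String))) (completed_pairs : List String) (batch_size : Int) : List (List (List (String × String))) :=
  let available := similarities.filter (fun sim => !(completed_pairs.contains (pvKeyA sim)))
  (PySem.List.pyRange 0 (available.length : Int) batch_size).foldl
    (fun batches i => batches ++ [PySem.List.slice available (some i) (some (i + batch_size))]) []

-- ===== PORT B =====
def pvStepB (completed_set : PySem.Set String) (batch_size : Int)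
    (st : List (List (List (String × String))) × List (List (String × String)))
    (sim : List (String × String)) :
    List (List (List (String × String))) × List (List (String × String)) :=
  if PySem.Set.contains completed_set (pvKeyA sim) then st
  else
    let current := st.2 ++ [sim]
    if (current.length : Int) = batch_size then (st.1 ++ [current], []) else (st.1, current)

def get_prioritized_batches_alt (similarities : List (List (String × String))) (completed_pairs : List String) (batch_size : Int) : List (List (List (String × String))) :=
  let done : PySem.Set String := PySem.Set.ofList completed_pairs
  let st := similarities.foldl (pvStepB done batch_size) ([], [])
  if st.2 ≠ [] then st.1 ++ [st.2] else st.1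

-- ===== PRECONDITION & SPEC =====
-- Pre_ excludes the inputs on which A raises — batch_size = 0 (range() step 0, ValueError) and a sim
-- without a 'pair_key' key (KeyError) — and negative batch_size when some sim is uncompleted, on which
-- A's empty result and B's single-batch result are both accidental readings of a nonsensical batch size.
def Pre_get_prioritized_batches (similarities : List (List (String × String))) (completed_pairs : List String) (batch_size : Int) : Prop :=
  (∀ sim ∈ similarities, "pair_key" ∈ sim.map Prod.fst) ∧
  (1 ≤ batch_size ∨ (batch_size ≤ -1 ∧ ∀ sim ∈ similarities, completed_pairs.contains (pvKeyA sim) = true))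
instance (similarities : List (List (String × String))) (completed_pairs : List String) (batch_size : Int) : Decidable (Pre_get_prioritized_batches similarities completed_pairs batch_size) := by unfold Pre_get_prioritized_batches; infer_instance

def pvWitness_get_prioritized_batches : (List (List (String × String))) × List String × Int :=
  ([[("pair_key", "p1~p2")], [("pair_key", "p3~p4")]], ["p3~p4"], 1)

def Spec_get_prioritized_batches (similarities : List (List (String × String))) (completed_pairs : List String) (batch_size : Int) (out : List (List (List (String × String)))) : Prop := out = get_prioritized_batches_alt similarities completed_pairs batch_size
instance (similarities : List (List (String × String))) (completed_pairs : List String) (batch_size : Int) (out : List (List (List (String × String)))) : Decidable (Spec_get_prioritized_batches similarities completed_pairs batch_size out) := by unfold Spec_get_prioritized_batches; infer_instance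

-- ===== CLAIM (what is proved, stated in full; the proofs are below) =====
def Claim_equal_get_prioritized_batches : Prop := ∀ (similarities : List (List (String × String))) (completed_pairs : List String) (batch_size : Int), Dom_get_prioritized_batches similarities completed_pairs batch_size → Pre_get_prioritized_batches similarities completed_pairs batch_size → Spec_get_prioritized_batches similarities completed_pairs batch_size (get_prioritized_batches similarities completed_pairs batch_size)


-- ===== LEMMAS AND PROOFS =====

-- range with a positive step: cons form
theorem pvRange_pos_cons {a b s : Int} (hs : 0 < s) (hab : a < b) :
    PySem.List.pyRange a b s = a :: PySem.List.pyRange (a + s) b s := by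
  have hs0 : s ≠ 0 := by omega
  rw [PySem.List.pyRange_of_pos _ _ hs, PySem.List.pyRange_of_pos _ _ hs, if_pos hab]
  have hdiv : (b - a + s - 1) / s = (b - a - 1) / s + 1 := by
    rw [show b - a + s - 1 = b - a - 1 + 1 * s by ring, Int.add_mul_ediv_right _ _ hs0]
  have hd0 : 0 ≤ (b - a - 1) / s := Int.ediv_nonneg (by omega) (by omega)
  have hc1 : ((b - a + s - 1) / s).toNat = ((b - a - 1) / s).toNat + 1 := by rw [hdiv]; omega
  rw [hc1, List.range_succ_eq_map, List.map_cons, List.map_map]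
  have hc2 : (if a + s < b then ((b - (a + s) + s - 1) / s).toNat else 0) = ((b - a - 1) / s).toNat := by
    split_ifs with h
    · rw [show b - (a + s) + s - 1 = b - a - 1 by ring]
    · have : (b - a - 1) / s = 0 := Int.ediv_eq_zero_of_lt (by omega) (by omega)
      omega
  rw [hc2]
  congr 1
  · simp
  apply List.map_congr_left
  intro k _
  simp [Nat.succ_eq_add_one]
  ring

-- range with a positive step: shift the start to 0
theorem pvRange_pos_shift {n s : Int} (hs : 0 < s) :
    PySem.List.pyRange s n s = (PySem.List.pyRange 0 (n - s) s).map (· + s) := by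
  rw [PySem.List.pyRange_of_pos _ _ hs, PySem.List.pyRange_of_pos _ _ hs, List.map_map]
  have hc : (if s < n then ((n - s + s - 1) / s).toNat else 0)
      = (if 0 < n - s then ((n - s - 0 + s - 1) / s).toNat else 0) := by
    rw [show n - s - 0 + s - 1 = n - s + s - 1 by ring]
    by_cases h : s < n
    · rw [if_pos h, if_pos (by omega)]
    · rw [if_neg h, if_neg (by omega)]
  rw [hc]
  apply List.map_congr_left
  intro k _
  simp
  ring

-- range from 0 down with a negative step is empty when the bound is nonnegative
theorem pvRange_neg_nil {n s : Int} (hs : s < 0) (hn : 0 ≤ n) :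
    PySem.List.pyRange 0 n s = [] := by
  unfold PySem.List.pyRange
  rw [if_neg (by omega), if_neg (by omega), if_neg (by omega)]
  simp

theorem pvRange_pos_nil {a b s : Int} (hs : 0 < s) (hab : b ≤ a) :
    PySem.List.pyRange a b s = [] := by
  rw [PySem.List.pyRange_of_pos _ _ hs, if_neg (by omega)]
  simp

-- reference chunking: split a list into chunks of size k+1
def pvChunks (k : Nat) : List (List (String × String)) → List (List (List (String × String)))
  | [] => []
  | x :: xs => (x :: xs.take k) :: pvChunks k (xs.drop k)
termination_by l => l.length
decreasing_by simp

-- A's range/slice loop computes pvChunks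
theorem pvSliceA (k : Nat) : ∀ (n : Nat) (l : List (List (String × String))), l.length = n →
    (PySem.List.pyRange 0 (l.length : Int) ((k : Int) + 1)).map
      (fun i => PySem.List.slice l (some i) (some (i + ((k : Int) + 1)))) = pvChunks k l := by
  intro n
  induction n using Nat.strong_induction_on with
  | _ n ih =>
    intro l hl
    have hs : (0 : Int) < (k : Int) + 1 := by omega
    match l with
    | [] =>
      rw [pvChunks]
      have h0 : PySem.List.pyRange 0 (([] : List (List (String × String))).length : Int) ((k : Int) + 1) = [] :=
        pvRange_pos_nil hs (by simp)
      rw [h0]; simp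
    | x :: xs =>
      have hlen : (0 : Int) < ((x :: xs).length : Int) := by
        simp
      rw [pvRange_pos_cons hs hlen, List.map_cons, zero_add, pvRange_pos_shift hs, List.map_map]
      rw [pvChunks]
      congr 1
      · -- head chunk = take (k+1)
        rw [PySem.List.slice_zero_start, PySem.List.slice_to _ (by omega)]
        have : ((k : Int) + 1).toNat = k + 1 := by omega
        rw [this, List.take_succ_cons]
      · -- tail chunks: reindex onto the dropped list and recurse
        have hdrop : (x :: xs).drop (k + 1) = xs.drop k := by simp
        have hmap : ∀ i ∈ PySem.List.pyRange 0 (((x :: xs).length : Int) - ((k : Int) + 1)) ((k : Int) + 1),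
            ((fun i => PySem.List.slice (x :: xs) (some i) (some (i + ((k : Int) + 1)))) ∘ (· + ((k : Int) + 1))) i
              = PySem.List.slice ((x :: xs).drop (k + 1)) (some i) (some (i + ((k : Int) + 1))) := by
          intro i hi
          have hi0 : 0 ≤ i := ((PySem.List.mem_pyRange_iff_of_pos hs i).mp hi).1
          simp only [Function.comp_apply]
          rw [PySem.List.slice_toNat (x :: xs) (a := i + ((k : Int) + 1)) (by omega) (by omega)]
          rw [PySem.List.slice_toNat ((x :: xs).drop (k + 1)) (a := i) (by omega) (by omega)]
          rw [List.drop_drop]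
          congr 1
          · omega
          · congr 1
            omega
        rw [List.map_congr_left hmap, hdrop]
        by_cases hle : k ≤ xs.length
        · have heq : ((x :: xs).length : Int) - ((k : Int) + 1) = ((xs.drop k).length : Int) := by
            simp; omega
          rw [heq]
          exact ih (xs.drop k).length (by simp at hl ⊢; omega) _ rfl
        · have h1 : PySem.List.pyRange 0 (((x :: xs).length : Int) - ((k : Int) + 1)) ((k : Int) + 1) = [] :=
            pvRange_pos_nil hs (by simp; omega)
          have h2 : xs.drop k = [] := List.drop_of_length_le (by omega)
          rw [h1, h2, pvChunks]
          simp

theorem pvChunks_append (k : Nat) (c t : List (List (String × String))) (hc : c.length = k + 1) :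
    pvChunks k (c ++ t) = c :: pvChunks k t := by
  match c, hc with
  | x :: ct, hc =>
    have h : ct.length = k := by simpa using hc
    rw [List.cons_append, pvChunks]
    rw [List.take_left' h, List.drop_left' h]

-- B's accumulator fold (over the already-filtered list) computes pvChunks
theorem pvFoldB (k : Nat) : ∀ (l : List (List (String × String))) (b : List (List (List (String × String))))
    (c : List (List (String × String))), c.length ≤ k →
    (let st := l.foldl (fun st sim =>
        let current := st.2 ++ [sim]
        if (current.length : Int) = ((k : Int) + 1) then (st.1 ++ [current], ([] : List (List (String × String)))) else (st.1, current)) (b, c)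
     if st.2 ≠ [] then st.1 ++ [st.2] else st.1) = b ++ pvChunks k (c ++ l) := by
  intro l
  induction l with
  | nil =>
    intro b c hc
    match c with
    | [] => simp [pvChunks]
    | c0 :: ct =>
      simp only [List.foldl_nil, List.append_nil]
      rw [pvChunks]
      have hct : ct.length ≤ k - 1 := by simp at hc; omega
      rw [List.take_of_length_le (by omega), List.drop_of_length_le (by omega), pvChunks]
      simp
  | cons sim t ih =>
    intro b c hc
    simp only [List.foldl_cons]
    by_cases h : ((c ++ [sim]).length : Int) = ((k : Int) + 1)
    · rw [if_pos h]
      have hck : (c ++ [sim]).length = k + 1 := by exact_mod_cast h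
      have := ih (b ++ [c ++ [sim]]) [] (by simp)
      simp only [List.nil_append] at this
      rw [this, List.append_cons c sim t, pvChunks_append k _ t hck]
      simp
    · rw [if_neg h]
      have hck : (c ++ [sim]).length ≤ k := by
        simp at h ⊢; omega
      have := ih b (c ++ [sim]) hck
      rw [this, List.append_cons c sim t]

-- set membership in B = list membership in A
theorem pvContains (completed : List String) (x : String) :
    PySem.Set.contains (PySem.Set.ofList completed) x = completed.contains x := by
  simp [PySem.Set.contains_eq_listContains]

-- B's guarded fold over all sims = the unguarded fold over A's filtered list
theorem pvFoldFilter (completed : List String) (bs : Int) (sims : List (List (String × String)))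
    (init : List (List (List (String × String))) × List (List (String × String))) :
    sims.foldl (pvStepB (PySem.Set.ofList completed) bs) init
      = (sims.filter (fun sim => !(completed.contains (pvKeyA sim)))).foldl
          (fun st sim =>
            let current := st.2 ++ [sim]
            if (current.length : Int) = bs then (st.1 ++ [current], ([] : List (List (String × String)))) else (st.1, current)) init := by
  rw [List.foldl_filter]
  congr 1
  funext st sim
  simp only [pvStepB, pvContains]
  cases completed.contains (pvKeyA sim)
  · simp
  · simp

-- ===== VERDICT (by name: the statement is the Claim_ definition above) =====
theorem get_prioritized_batches_spec : Claim_equal_get_prioritized_batches := by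
  intro sims completed bs _ hpre
  obtain ⟨-, hcase⟩ := hpre
  unfold Spec_get_prioritized_batches get_prioritized_batches get_prioritized_batches_alt
  simp only
  rw [pvFoldFilter]
  rcases hcase with hbs | ⟨hneg, hall⟩
  · -- positive batch size: both sides chunk the filtered list into pieces of batch_size
    set k := (bs - 1).toNat with hk
    have hbsk : bs = (k : Int) + 1 := by omega
    rw [hbsk, PySem.List.foldl_append_singleton_eq_map, List.nil_append]
    rw [pvSliceA k _ _ rfl]
    have hB := pvFoldB k (sims.filter (fun sim => !(completed.contains (pvKeyA sim)))) [] [] (by simp)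
    simp only [List.nil_append] at hB
    rw [← hB]
  · -- negative batch size, every sim completed: the filtered list is empty and both sides return []
    have hfilt : sims.filter (fun sim => !(completed.contains (pvKeyA sim))) = [] :=
      List.filter_eq_nil_iff.mpr (fun sim hm => by simp [List.contains_iff_mem.mp (hall sim hm)])
    rw [hfilt]
    rw [pvRange_neg_nil (by omega : bs < 0) (by simp)]
    simp
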